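-- pv_equiv track=rewrite | github.com/omar2929/Kaggle_Connect4_AI_Agent | puissance_4.py | calcul_alignement
-- ===== SOURCE A (Python) =====
-- def calcul_alignement(board_2d, player, config, sequence_length):
--     # Vérifie les alignements horizontaux
--     for row in board_2d:
--         consecutive_count = 0
--         for cell in row:
--             if cell == player:
--                 consecutive_count += 1
--                 if consecutive_count == sequence_length:
--                     return True  # Retourner True si une séquence est trouvée
--             else:
--                 consecutive_count = 0  # Réinitialiser le compteur si la séquence est interrompue
--
--     # Vérifie les alignements verticaux
--     for col_index in range(len(board_2d[0])):
--         consecutive_count = 0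
--         for row in board_2d:
--             if row[col_index] == player:
--                 consecutive_count += 1
--                 if consecutive_count == sequence_length:
--                     return True  # Retourner True si une séquence est trouvée
--             else:
--                 consecutive_count = 0  # Réinitialiser le compteur si la séquence est interrompue
--
--     # Ajoutez ici la logique pour vérifier les alignements diagonaux si nécessaire
--
--     return False  # Retourner False si aucune séquence n'est trouvée
-- ===== SOURCE B (Python) =====
-- def calcul_alignement(board_2d, player, config, sequence_length):
--     # group-free "breaks" decomposition: positions of non-player cells bound the
--     # maximal player-runs; a run of length >= sequence_length exists iff some gap
--     # between consecutive breaks (with virtual breaks at -1 and len) is >= it.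
--     if sequence_length < 1:
--         return False
--
--     def has_run(cells):
--         bs = [-1] + [i for i, c in enumerate(cells) if c != player] + [len(cells)]
--         return any(b - a - 1 >= sequence_length for a, b in zip(bs, bs[1:]))
--
--     lines = list(board_2d) + [list(col) for col in zip(*board_2d)]
--     return any(has_run(line) for line in lines)
-- ===== Notes on version B (the rewrite author's own statement) =====
-- stated objective: alternative
-- what changed: Replaces the early-returning nested consecutive-counter state machine (and the index-by-index column rescans) with a declarative decomposition: each line's maximal runs are measured as gaps between positions of non-player cells, verticals come from a zip-based transpose, and the answer is one 'any' over rows ++ columns.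
-- outside the precondition, e.g. on calcul_alignement([[1, 1], [1]], 1, {}, 2): A returns True, B returns True; on calcul_alignement([], 1, {}, 2): A raises IndexError, B returns False
import Mathlib
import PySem

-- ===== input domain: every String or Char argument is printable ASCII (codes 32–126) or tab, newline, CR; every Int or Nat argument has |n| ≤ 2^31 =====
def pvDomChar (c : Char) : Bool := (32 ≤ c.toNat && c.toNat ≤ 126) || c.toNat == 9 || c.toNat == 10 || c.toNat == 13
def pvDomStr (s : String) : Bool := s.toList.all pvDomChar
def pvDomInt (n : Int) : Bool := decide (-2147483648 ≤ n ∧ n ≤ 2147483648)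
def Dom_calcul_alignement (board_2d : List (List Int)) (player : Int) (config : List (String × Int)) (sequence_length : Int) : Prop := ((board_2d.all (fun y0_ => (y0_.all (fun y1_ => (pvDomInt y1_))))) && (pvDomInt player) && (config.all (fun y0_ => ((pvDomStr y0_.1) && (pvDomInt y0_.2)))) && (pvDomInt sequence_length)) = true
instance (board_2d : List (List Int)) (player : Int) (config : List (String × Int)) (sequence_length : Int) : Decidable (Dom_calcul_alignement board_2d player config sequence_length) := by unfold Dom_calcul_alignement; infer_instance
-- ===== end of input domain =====

-- B replaces A's early-returning consecutive-counter state machine (and index-by-index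
-- column rescans) with a breaks/gaps decomposition over rows ++ a zip-style transpose
-- (objective: alternative, same cost).

-- ===== PORT A =====
-- inner horizontal loop: consecutive counter, early return when it reaches sequence_length
def pvA_rowScan (player seq : Int) : List Int → Int → Bool
  | [], _ => false
  | c :: cs, cnt =>
    if c = player then
      if cnt + 1 = seq then true else pvA_rowScan player seq cs (cnt + 1)
    else pvA_rowScan player seq cs 0

def pvA_horiz (player seq : Int) : List (List Int) → Bool
  | [] => false
  | r :: rs => if pvA_rowScan player seq r 0 then true else pvA_horiz player seq rs

-- inner vertical loop over rows at a fixed column index; row[col_index] is pyGet?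
-- (none = IndexError in Python; such inputs are excluded by Pre_, port returns false)
def pvA_colScan (player seq j : Int) : List (List Int) → Int → Bool
  | [], _ => false
  | r :: rs, cnt =>
    match PySem.List.pyGet? r j with
    | none => false
    | some v =>
      if v = player then
        if cnt + 1 = seq then true else pvA_colScan player seq j rs (cnt + 1)
      else pvA_colScan player seq j rs 0

def pvA_vert (player seq : Int) (board : List (List Int)) : List Int → Bool
  | [] => false
  | j :: js => if pvA_colScan player seq j board 0 then true else pvA_vert player seq board js

def calcul_alignement (board_2d : List (List Int)) (player : Int) (config : List (String × Int)) (sequence_length : Int) : Bool :=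
  if pvA_horiz player sequence_length board_2d then true
  else
    match PySem.List.pyGet? board_2d 0 with
    | none => false   -- board_2d[0]: IndexError on an empty board (excluded by Pre_)
    | some r0 => pvA_vert player sequence_length board_2d (PySem.List.pyRange 0 (r0.length : Int) 1)

-- ===== PORT B =====
-- [i for i, c in enumerate(cells) if c != player]
def pvB_pos (player : Int) (cells : List Int) : List Int :=
  (PySem.List.enumerate cells 0).filterMap (fun ic => if ic.2 ≠ player then some ic.1 else none)

-- bs = [-1] + positions of non-player cells + [len(cells)]
def pvB_breaks (player : Int) (cells : List Int) : List Int :=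
  [-1] ++ pvB_pos player cells ++ [(cells.length : Int)]

-- any(b - a - 1 >= sequence_length for a, b in zip(bs, bs[1:]))
def pvB_anyGap (seq : Int) (bs : List Int) : Bool :=
  (bs.zip bs.tail).any (fun ab => decide (seq ≤ ab.2 - ab.1 - 1))

def pvB_hasRun (player seq : Int) (cells : List Int) : Bool :=
  pvB_anyGap seq (pvB_breaks player cells)

-- zip(*board_2d): columns up to the shortest row (exact for Python's zip truncation)
def pvB_ncols (board : List (List Int)) : Nat :=
  match board with
  | [] => 0
  | r :: rs => rs.foldl (fun m r' => min m r'.length) r.length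

def pvB_transpose (board : List (List Int)) : List (List Int) :=
  (List.range (pvB_ncols board)).map (fun j => board.map (fun r => r.getD j 0))

def calcul_alignement_alt (board_2d : List (List Int)) (player : Int) (config : List (String × Int)) (sequence_length : Int) : Bool :=
  if sequence_length < 1 then false
  else (board_2d ++ pvB_transpose board_2d).any (pvB_hasRun player sequence_length)

-- ===== PRECONDITION & SPEC =====
-- Pre_ excludes empty boards (board_2d[0] raises IndexError) and ragged boards with a
-- row shorter than the first row, on which A's vertical scan raises IndexError unless
-- an alignment happens to return first (those lucky ragged inputs are also excluded).
def Pre_calcul_alignement (board_2d : List (List Int)) (player : Int) (config : List (String × Int)) (sequence_length : Int) : Prop :=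
  board_2d ≠ [] ∧ ∀ r ∈ board_2d, (board_2d.headD []).length ≤ r.length
instance (board_2d : List (List Int)) (player : Int) (config : List (String × Int)) (sequence_length : Int) : Decidable (Pre_calcul_alignement board_2d player config sequence_length) := by unfold Pre_calcul_alignement; infer_instance

def pvWitness_calcul_alignement : List (List Int) × Int × (List (String × Int)) × Int := ([[1, 0], [1, 0]], 1, [], 2)

def Spec_calcul_alignement (board_2d : List (List Int)) (player : Int) (config : List (String × Int)) (sequence_length : Int) (out : Bool) : Prop := out = calcul_alignement_alt board_2d player config sequence_length
instance (board_2d : List (List Int)) (player : Int) (config : List (String × Int)) (sequence_length : Int) (out : Bool) : Decidable (Spec_calcul_alignement board_2d player config sequence_length out) := by unfold Spec_calcul_alignement; infer_instance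

-- ===== CLAIM (what is proved, stated in full; the proofs are below) =====
def Claim_equal_calcul_alignement : Prop := ∀ (board_2d : List (List Int)) (player : Int) (config : List (String × Int)) (sequence_length : Int), Dom_calcul_alignement board_2d player config sequence_length → Pre_calcul_alignement board_2d player config sequence_length → Spec_calcul_alignement board_2d player config sequence_length (calcul_alignement board_2d player config sequence_length)

-- ===== LEMMAS AND PROOFS =====

-- maximum length of a maximal player-run, carrying the length c of the current run
def pvRunMax (player : Int) (c : Nat) : List Int → Nat
  | [] => c
  | x :: xs => if x = player then pvRunMax player (c + 1) xs else max c (pvRunMax player 0 xs)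

theorem le_pvRunMax (player : Int) (cs : List Int) (c : Nat) : c ≤ pvRunMax player c cs := by
  induction cs generalizing c with
  | nil => simp [pvRunMax]
  | cons x xs ih =>
    simp only [pvRunMax]
    split_ifs with h
    · exact le_trans (Nat.le_succ c) (ih (c + 1))
    · exact le_max_left _ _

theorem rowScan_eq_runMax (player seq : Int) (cs : List Int) (c : Nat) (hc : (c : Int) < seq) :
    pvA_rowScan player seq cs (c : Int) = decide (seq ≤ (pvRunMax player c cs : Int)) := by
  induction cs generalizing c with
  | nil =>
    simp only [pvA_rowScan, pvRunMax]
    symm; simp; omega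
  | cons x xs ih =>
    simp only [pvA_rowScan, pvRunMax]
    split_ifs with h hs
    · -- reached seq
      have := le_pvRunMax player xs (c + 1)
      symm; simp only [decide_eq_true_iff]
      omega
    · -- continue the run
      have : ((c + 1 : Nat) : Int) = (c : Int) + 1 := by push_cast; ring
      rw [← this, ih (c + 1) (by push_cast at this ⊢; omega)]
    · -- run broken
      have h0 := ih 0 (by omega)
      simp only [Nat.cast_zero] at h0
      rw [h0]
      simp only [Nat.cast_max, decide_eq_decide, le_max_iff]
      omega

theorem rowScan_false_of_nonpos (player seq : Int) (hseq : seq ≤ 0) (cs : List Int) :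
    ∀ c : Int, 0 ≤ c → pvA_rowScan player seq cs c = false := by
  induction cs with
  | nil => intro c _; simp [pvA_rowScan]
  | cons x xs ih =>
    intro c hc
    simp only [pvA_rowScan]
    split_ifs with h hs
    · omega
    · exact ih (c + 1) (by omega)
    · exact ih 0 (by omega)

theorem colScan_eq_rowScan (player seq : Int) (rows : List (List Int)) (j : Nat)
    (hj : ∀ r ∈ rows, j < r.length) (c : Int) :
    pvA_colScan player seq (j : Int) rows c
      = pvA_rowScan player seq (rows.map (fun r => r.getD j 0)) c := by
  induction rows generalizing c with
  | nil => simp [pvA_colScan, pvA_rowScan]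
  | cons r rs ih =>
    have hr : j < r.length := hj r (List.mem_cons_self ..)
    have hget : PySem.List.pyGet? r (j : Int) = some (r.getD j 0) := by
      rw [PySem.List.pyGet?_natCast, List.getElem?_eq_getElem hr, List.getD_eq_getElem r 0 hr]
    simp only [pvA_colScan, pvA_rowScan, hget, List.map_cons]
    split_ifs with h hs
    · rfl
    · exact ih (fun r hr' => hj r (List.mem_cons_of_mem _ hr')) (c + 1)
    · exact ih (fun r hr' => hj r (List.mem_cons_of_mem _ hr')) 0

theorem horiz_eq_any (player seq : Int) (rows : List (List Int)) :
    pvA_horiz player seq rows = rows.any (fun r => pvA_rowScan player seq r 0) := by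
  induction rows with
  | nil => simp [pvA_horiz]
  | cons r rs ih =>
    simp only [pvA_horiz, List.any_cons, ← ih]
    split_ifs with h <;> simp [h]

theorem vert_eq_any (player seq : Int) (board : List (List Int)) (js : List Int) :
    pvA_vert player seq board js = js.any (fun j => pvA_colScan player seq j board 0) := by
  induction js with
  | nil => simp [pvA_vert]
  | cons j js ih =>
    simp only [pvA_vert, List.any_cons, ← ih]
    split_ifs with h <;> simp [h]

theorem anyGap_breaks_eq (player seq : Int) (cs : List Int) :
    ∀ (c : Nat) (i : Int),
      pvB_anyGap seq ((i - 1 - (c : Int)) :: ((PySem.List.enumerate cs i).filterMap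
          (fun ic => if ic.2 ≠ player then some ic.1 else none) ++ [i + (cs.length : Int)]))
        = decide (seq ≤ (pvRunMax player c cs : Int)) := by
  induction cs with
  | nil =>
    intro c i
    simp only [PySem.List.enumerate_nil, List.filterMap_nil, List.nil_append, pvB_anyGap,
      pvRunMax, List.length_nil, Nat.cast_zero, add_zero, List.tail_cons, List.zip_cons_cons,
      List.zip_nil_right, List.any_cons, List.any_nil, Bool.or_false]
    simp only [decide_eq_decide]
    omega
  | cons x xs ih =>
    intro c i
    rw [PySem.List.enumerate_cons]
    by_cases h : x = player
    · -- same run continues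
      rw [List.filterMap_cons_none (by simp [h])]
      have h1 : i - 1 - (c : Int) = (i + 1) - 1 - ((c + 1 : Nat) : Int) := by push_cast; ring
      have h2 : i + ((x :: xs).length : Int) = (i + 1) + (xs.length : Int) := by
        simp only [List.length_cons]; push_cast; ring
      rw [h1, h2, ih (c + 1) (i + 1)]
      simp [pvRunMax, h]
    · -- a break at index i
      rw [List.filterMap_cons_some (b := i) (by simp [h])]
      have h2 : i + ((x :: xs).length : Int) = (i + 1) + (xs.length : Int) := by
        simp only [List.length_cons]; push_cast; ring
      have hrest := ih 0 (i + 1)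
      have e1 : (i + 1) - 1 - ((0 : Nat) : Int) = i := by push_cast; ring
      rw [e1, ← h2] at hrest
      have hsplit : ∀ (a b : Int) (t : List Int), pvB_anyGap seq (a :: b :: t)
          = (decide (seq ≤ b - a - 1) || pvB_anyGap seq (b :: t)) := by
        intro a b t; simp [pvB_anyGap]
      simp only [List.cons_append]
      rw [hsplit, hrest]
      have hgap : i - (i - 1 - (c : Int)) - 1 = (c : Int) := by ring
      rw [hgap]
      simp only [pvRunMax, h, if_false, Nat.cast_max]
      rcases le_total ((c : Nat) : Int) ((pvRunMax player 0 xs : Nat) : Int) with hle | hle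
      · rw [max_eq_right hle]
        by_cases hq : seq ≤ ((pvRunMax player 0 xs : Nat) : Int) <;> by_cases hp : seq ≤ ((c : Nat) : Int) <;>
          simp [hp, hq]; omega
      · rw [max_eq_left hle]
        by_cases hq : seq ≤ ((pvRunMax player 0 xs : Nat) : Int) <;> by_cases hp : seq ≤ ((c : Nat) : Int) <;>
          simp [hp, hq]; omega

theorem hasRun_eq_runMax (player seq : Int) (cs : List Int) :
    pvB_hasRun player seq cs = decide (seq ≤ (pvRunMax player 0 cs : Int)) := by
  have h := anyGap_breaks_eq player seq cs 0 0
  simpa [pvB_hasRun, pvB_breaks, pvB_pos] using h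

theorem rowScan_eq_hasRun (player seq : Int) (hseq : 1 ≤ seq) (cs : List Int) :
    pvA_rowScan player seq cs 0 = pvB_hasRun player seq cs := by
  have h0 : ((0 : Nat) : Int) = (0 : Int) := rfl
  rw [hasRun_eq_runMax, ← h0, rowScan_eq_runMax player seq cs 0 (by omega)]

theorem foldl_min_const (rs : List (List Int)) (a : Nat) (h : ∀ r ∈ rs, a ≤ r.length) :
    rs.foldl (fun m r' => min m r'.length) a = a := by
  induction rs with
  | nil => rfl
  | cons r rs ih =>
    simp only [List.foldl_cons, min_eq_left (h r (List.mem_cons_self ..))]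
    exact ih fun r hr => h r (List.mem_cons_of_mem _ hr)

-- ===== VERDICT (by name: the statement is the Claim_ definition above) =====
theorem calcul_alignement_spec : Claim_equal_calcul_alignement := by
  intro board player config seq _ hPre
  obtain ⟨hne, hlen⟩ := hPre
  obtain ⟨r0, rs, rfl⟩ : ∃ r0 rs, board = r0 :: rs := by
    cases board with
    | nil => exact absurd rfl hne
    | cons r0 rs => exact ⟨r0, rs, rfl⟩
  simp only [List.headD_cons] at hlen
  unfold Spec_calcul_alignement
  have hget0 : PySem.List.pyGet? (r0 :: rs) (0 : Int) = some r0 := by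
    simp
  have hA : calcul_alignement (r0 :: rs) player config seq
      = (if pvA_horiz player seq (r0 :: rs) then true
         else pvA_vert player seq (r0 :: rs) (PySem.List.pyRange 0 (r0.length : Int) 1)) := by
    unfold calcul_alignement
    rw [hget0]
  have hncols : pvB_ncols (r0 :: rs) = r0.length :=
    foldl_min_const rs r0.length (fun r hr => hlen r (List.mem_cons_of_mem _ hr))
  -- rewrite A's vertical scan into an any over column lists
  have hvert : pvA_vert player seq (r0 :: rs) (PySem.List.pyRange 0 (r0.length : Int) 1)
      = (List.range r0.length).any
          (fun j => pvA_rowScan player seq ((r0 :: rs).map (fun r => r.getD j 0)) 0) := by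
    rw [vert_eq_any, PySem.List.pyRange_one]
    simp only [sub_zero, Int.toNat_natCast, List.any_map, Function.comp_def, zero_add]
    refine PySem.List.any_congr_mem ?_
    intro j hj
    have hjlt : j < r0.length := List.mem_range.mp hj
    exact colScan_eq_rowScan player seq (r0 :: rs) j
      (fun r hr => lt_of_lt_of_le hjlt (hlen r hr)) 0
  rw [hA]
  unfold calcul_alignement_alt
  by_cases hseq : seq < 1
  · -- sequence_length < 1: both sides are false
    have hrowsF : ∀ r, pvA_rowScan player seq r 0 = false := fun r =>
      rowScan_false_of_nonpos player seq (by omega) r 0 le_rfl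
    have hhoriz : pvA_horiz player seq (r0 :: rs) = false := by
      rw [horiz_eq_any]; simp [hrowsF]
    rw [if_pos hseq, hhoriz, if_neg (by simp), hvert]
    simp [hrowsF]
  · replace hseq : 1 ≤ seq := by omega
    rw [if_neg (by omega : ¬ seq < 1), horiz_eq_any]
    by_cases hh : (r0 :: rs).any (fun r => pvA_rowScan player seq r 0) = true
    · rw [if_pos hh]
      symm
      rw [List.any_append]
      have : (r0 :: rs).any (pvB_hasRun player seq) = true := by
        rw [PySem.List.any_congr_mem (g := fun r => pvA_rowScan player seq r 0)
          (fun r _ => (rowScan_eq_hasRun player seq hseq r).symm)]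
        exact hh
      simp [this]
    · rw [if_neg hh, hvert, List.any_append]
      have hrows : (r0 :: rs).any (pvB_hasRun player seq) = false := by
        rw [PySem.List.any_congr_mem (g := fun r => pvA_rowScan player seq r 0)
          (fun r _ => (rowScan_eq_hasRun player seq hseq r).symm)]
        simpa using hh
      rw [hrows, Bool.false_or]
      unfold pvB_transpose
      rw [hncols, List.any_map]
      symm
      refine PySem.List.any_congr_mem ?_
      intro j _
      simp only [Function.comp_apply]
      exact (rowScan_eq_hasRun player seq hseq ((r0 :: rs).map (fun r => r.getD j 0))).symm
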